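-- pv_equiv track=rewrite | github.com/CHOU-YI-HUNG/Leetcode | python/6-Stack/5-BasicCalculator/test.py | split_with_symbols
-- ===== SOURCE A (Python) =====
-- def split_with_symbols(text):
--     split_result = []
--     i = 0
--     while i < len(text):
--         if text[i] in "+-":
--             split_result.append(text[i])
--             i += 1
--         else:
--             start_index = i
--             while i < len(text) and text[i] not in "+-":
--                 i += 1
--             split_result.append(text[start_index:i])
--     return split_result
-- ===== SOURCE B (Python) =====
-- def split_with_symbols(text):
--     result = []
--     cur = []
--     for ch in text:
--         if ch in "+-":
--             if cur:
--                 result.append(''.join(cur))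
--                 cur = []
--             result.append(ch)
--         else:
--             cur.append(ch)
--     if cur:
--         result.append(''.join(cur))
--     return result
-- ===== Notes on version B (the rewrite author's own statement) =====
-- stated objective: simpler
-- what changed: Replaces the index-based while-loop with an inner run-scanning while by a single for-each pass that accumulates the current run in a buffer and flushes it at each +/- symbol (no manual index, no per-character indexing/slicing).
import Mathlib
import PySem

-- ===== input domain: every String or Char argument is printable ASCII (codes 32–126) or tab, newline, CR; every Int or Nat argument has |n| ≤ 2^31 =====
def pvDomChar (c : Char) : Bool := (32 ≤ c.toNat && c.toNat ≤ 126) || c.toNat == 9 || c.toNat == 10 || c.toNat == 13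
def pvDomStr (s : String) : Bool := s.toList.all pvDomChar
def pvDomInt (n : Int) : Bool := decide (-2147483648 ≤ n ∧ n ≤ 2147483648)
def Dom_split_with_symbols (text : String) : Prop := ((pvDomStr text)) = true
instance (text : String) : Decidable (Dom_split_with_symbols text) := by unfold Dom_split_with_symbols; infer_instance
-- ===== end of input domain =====

-- B replaces A's index-based outer/inner while loops by a single for-each pass with a run buffer (simpler; same cost).

-- ===== PORT A =====
-- inner while: 'while i < len(text) and text[i] not in "+-": i += 1' — the run taken / the rest
def pvTakeRun : List Char → List Char
  | [] => []
  | c :: rest => if c == '+' || c == '-' then [] else c :: pvTakeRun rest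

def pvDropRun : List Char → List Char
  | [] => []
  | c :: rest => if c == '+' || c == '-' then c :: rest else pvDropRun rest

theorem pvDropRun_len_le : ∀ (l : List Char), (pvDropRun l).length ≤ l.length
  | [] => Nat.le_refl _
  | c :: rest => by
    simp only [pvDropRun]
    split
    · exact Nat.le_refl _
    · exact Nat.le_succ_of_le (pvDropRun_len_le rest)

-- outer while over the remaining characters
def pvALoop : List Char → List String
  | [] => []
  | c :: rest =>
    if c == '+' || c == '-' then String.ofList [c] :: pvALoop rest
    else String.ofList (c :: pvTakeRun rest) :: pvALoop (pvDropRun rest)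
termination_by l => l.length
decreasing_by
  · simp
  · exact Nat.lt_succ_of_le (pvDropRun_len_le rest)

def split_with_symbols (text : String) : List String := pvALoop text.toList

-- ===== PORT B =====
def pvFlush (st : List String × List Char) : List String :=
  if st.2.isEmpty then st.1 else st.1 ++ [String.ofList st.2]

def pvBStep (st : List String × List Char) (ch : Char) : List String × List Char :=
  if ch == '+' || ch == '-' then (pvFlush st ++ [String.ofList [ch]], [])
  else (st.1, st.2 ++ [ch])

def split_with_symbols_alt (text : String) : List String :=
  pvFlush (text.toList.foldl pvBStep ([], []))

-- ===== PRECONDITION & SPEC =====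
def Spec_split_with_symbols (text : String) (out : List String) : Prop := out = split_with_symbols_alt text
instance (text : String) (out : List String) : Decidable (Spec_split_with_symbols text out) := by unfold Spec_split_with_symbols; infer_instance

-- ===== CLAIM (what is proved, stated in full; the proofs are below) =====
def Claim_equal_split_with_symbols : Prop := ∀ (text : String), Dom_split_with_symbols text → Spec_split_with_symbols text (split_with_symbols text)

-- ===== LEMMAS AND PROOFS =====

-- tokens still to be produced, given the pending run buffer `cur`
def pvTok (cur : List Char) : List Char → List String
  | [] => if cur.isEmpty then [] else [String.ofList cur]
  | c :: rest =>
    if c == '+' || c == '-' then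
      (if cur.isEmpty then [] else [String.ofList cur]) ++ String.ofList [c] :: pvTok [] rest
    else pvTok (cur ++ [c]) rest

theorem pvFoldl_tok : ∀ (l : List Char) (acc : List String) (cur : List Char),
    pvFlush (l.foldl pvBStep (acc, cur)) = acc ++ pvTok cur l
  | [], acc, cur => by
    simp only [List.foldl_nil, pvFlush, pvTok]
    split <;> simp
  | c :: rest, acc, cur => by
    simp only [List.foldl_cons, pvBStep, pvTok]
    split
    · rw [pvFoldl_tok rest]
      simp [pvFlush]
      split <;> simp
    · rw [pvFoldl_tok rest]

theorem pvTok_aLoop : ∀ (l : List Char) (cur : List Char),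
    pvTok cur l =
      if cur.isEmpty then pvALoop l
      else String.ofList (cur ++ pvTakeRun l) :: pvALoop (pvDropRun l)
  | [], cur => by
    simp only [pvTok, pvALoop, pvTakeRun, pvDropRun]
    split <;> simp
  | c :: rest, cur => by
    by_cases hc : (c == '+' || c == '-') = true
    · simp only [pvTok, pvTakeRun, pvDropRun, if_pos hc, pvTok_aLoop rest []]
      split <;> simp [pvALoop, hc]
    · simp only [pvTok, pvTakeRun, pvDropRun, if_neg hc, pvTok_aLoop rest (cur ++ [c])]
      split <;> simp_all [pvALoop]

-- ===== VERDICT (by name: the statement is the Claim_ definition above) =====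
theorem split_with_symbols_spec : Claim_equal_split_with_symbols := by
  intro text _
  unfold Spec_split_with_symbols split_with_symbols split_with_symbols_alt
  rw [pvFoldl_tok, pvTok_aLoop]
  simp
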